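-- pv_equiv track=rewrite | github.com/Ktwsz/wdi-zestaw2 | 5.py | foo
-- ===== SOURCE A (Python) =====
-- def check(n, a):
--     while n > 0:
--         if n % 10 == a % 10:
--             a //= 10
--         n //= 10
--     return a == 0
--
-- def foo(n):
--     a = 7
--     ans = 0
--     while a <= n:
--         if check(n, a):
--             ans += 1
--         a += 7
--     return ans
-- ===== SOURCE B (Python) =====
-- def foo(n):
--     # Build the set of all values readable as a digit-subsequence of n,
--     # one digit at a time, then count the multiples of 7 that are >= 7.
--     ds = []
--     m = n
--     while m > 0:
--         ds.append(m % 10)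
--         m //= 10
--     vals = {0}
--     for d in reversed(ds):
--         vals |= {10 * b + d for b in vals}
--     return sum(1 for v in vals if v >= 7 and v % 7 == 0)
-- ===== Notes on version B (the rewrite author's own statement) =====
-- stated objective: faster
-- what changed: Instead of looping over every multiple of 7 up to n and testing each with a digit-matching scan, B builds the set of all distinct digit-subsequence values of n in one pass over n's digits and counts the multiples of 7 that are at least 7.
import Mathlib
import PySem

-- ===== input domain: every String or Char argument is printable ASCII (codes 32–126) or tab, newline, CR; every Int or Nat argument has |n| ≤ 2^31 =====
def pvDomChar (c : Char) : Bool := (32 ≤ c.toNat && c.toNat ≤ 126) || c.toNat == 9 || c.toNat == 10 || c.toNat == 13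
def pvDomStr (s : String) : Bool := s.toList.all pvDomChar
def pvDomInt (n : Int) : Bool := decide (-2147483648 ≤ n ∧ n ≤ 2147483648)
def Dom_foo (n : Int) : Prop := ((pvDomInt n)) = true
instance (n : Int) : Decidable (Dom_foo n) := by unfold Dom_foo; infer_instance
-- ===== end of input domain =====

-- B replaces A's loop over every multiple of 7 (each tested by a digit-matching scan) by one
-- pass over n's digits that builds the set of all distinct digit-subsequence values of n and
-- then counts the multiples of 7 that are at least 7 (objective: faster).

-- ===== PORT A =====
def check (n a : Int) : Bool :=
  if _h : 0 < n then
    check (PySem.Int.floordiv n 10)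
      (if PySem.Int.mod n 10 == PySem.Int.mod a 10 then PySem.Int.floordiv a 10 else a)
  else a == 0
termination_by n.toNat
decreasing_by
  have : PySem.Int.floordiv n 10 = n / 10 := PySem.Int.floordiv_eq_ediv_of_pos (by norm_num)
  rw [this]; omega

def fooLoop (n a ans : Int) : Int :=
  if _h : a ≤ n then
    fooLoop n (a + 7) (if check n a then ans + 1 else ans)
  else ans
termination_by (n + 7 - a).toNat
decreasing_by omega

def foo (n : Int) : Int := fooLoop n 7 0

-- ===== PORT B =====
-- digits of n, least significant first (the `ds` list of Source B)
def digitsLSF (m : Int) : List Int :=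
  if _h : 0 < m then PySem.Int.mod m 10 :: digitsLSF (PySem.Int.floordiv m 10) else []
termination_by m.toNat
decreasing_by
  have : PySem.Int.floordiv m 10 = m / 10 := PySem.Int.floordiv_eq_ediv_of_pos (by norm_num)
  rw [this]; omega

-- vals |= {10*b + d for b in vals}
def stepSet (s : PySem.Set Int) (d : Int) : PySem.Set Int :=
  PySem.Set.union s (s.map (fun b => 10 * b + d))

def foo_alt (n : Int) : Int :=
  let ds := digitsLSF n
  let vals := ds.reverse.foldl stepSet (PySem.Set.ofList [0])
  ((vals.filter (fun v => decide (7 ≤ v) && (PySem.Int.mod v 7 == 0))).length : Int)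

-- ===== PRECONDITION & SPEC =====
def Spec_foo (n : Int) (out : Int) : Prop := out = foo_alt n
instance (n : Int) (out : Int) : Decidable (Spec_foo n out) := by unfold Spec_foo; infer_instance

-- ===== CLAIM (what is proved, stated in full; the proofs are below) =====
def Claim_equal_foo : Prop := ∀ (n : Int), Dom_foo n → Spec_foo n (foo n)

-- ===== LEMMAS AND PROOFS =====

-- strong induction on the Nat magnitude of an Int
theorem int_strong (P : Int → Prop)
    (H : ∀ n : Int, (∀ m : Int, m.toNat < n.toNat → P m) → P n) : ∀ n : Int, P n := by
  intro n
  generalize hk : n.toNat = k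
  induction k using Nat.strong_induction_on generalizing n with
  | _ k ih => exact H n (fun m hm => ih m.toNat (hk ▸ hm) m rfl)

-- unfolding of check, with floordiv/mod rewritten to / and %
theorem check_pos (n a : Int) (h : 0 < n) :
    check n a = check (n / 10) (if n % 10 = a % 10 then a / 10 else a) := by
  rw [check]
  simp [h, beq_iff_eq]

theorem check_nonpos (n a : Int) (h : ¬ 0 < n) : check n a = (a == 0) := by
  rw [check]; simp [h]

-- closure: if a's digits match into n's, so do (a // 10)'s
theorem check_div10 : ∀ n : Int, ∀ a : Int, 0 ≤ a → check n a = true → check n (a / 10) = true := by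
  refine int_strong (fun n => ∀ a : Int, 0 ≤ a → check n a = true → check n (a / 10) = true) ?_
  intro n ih a ha hc
  by_cases h : 0 < n
  · have hm : (n / 10).toNat < n.toNat := by omega
    have ha' : 0 ≤ a / 10 := by omega
    rw [check_pos n a h] at hc
    rw [check_pos n (a / 10) h]
    by_cases h1 : n % 10 = a % 10
    · rw [if_pos h1] at hc
      by_cases h2 : n % 10 = (a / 10) % 10
      · rw [if_pos h2]; exact ih _ hm _ ha' hc
      · rw [if_neg h2]; exact hc
    · rw [if_neg h1] at hc
      by_cases h2 : n % 10 = (a / 10) % 10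
      · rw [if_pos h2]; exact ih _ hm _ ha' (ih _ hm _ ha hc)
      · rw [if_neg h2]; exact ih _ hm _ ha hc
  · rw [check_nonpos n a h] at hc
    rw [check_nonpos n _ h]
    simp at hc
    simp [hc]

-- proof-side name for the set Source B builds
def T (n : Int) : List Int := (digitsLSF n).reverse.foldl stepSet (PySem.Set.ofList [0])

theorem T_nonpos (n : Int) (h : ¬ 0 < n) : T n = [0] := by
  unfold T; rw [digitsLSF]; simp [h, PySem.Set.ofList]

theorem T_pos (n : Int) (h : 0 < n) : T n = stepSet (T (n / 10)) (n % 10) := by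
  unfold T; rw [digitsLSF]
  simp [h, List.foldl_append]

theorem mem_stepSet (s : PySem.Set Int) (d x : Int) :
    x ∈ stepSet s d ↔ x ∈ s ∨ ∃ b ∈ s, x = 10 * b + d := by
  unfold stepSet
  rw [PySem.Set.mem_union]
  simp [List.mem_map, eq_comm]

theorem T_nodup : ∀ n : Int, (T n).Nodup := by
  refine int_strong (fun n => (T n).Nodup) ?_
  intro n ih
  by_cases h : 0 < n
  · rw [T_pos n h]
    exact PySem.Set.nodup_union _ _ (ih (n / 10) (by omega))
  · rw [T_nonpos n h]; simp

theorem T_le : ∀ n : Int, ∀ v ∈ T n, v ≤ max n 0 := by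
  refine int_strong (fun n => ∀ v ∈ T n, v ≤ max n 0) ?_
  intro n ih v hv
  by_cases h : 0 < n
  · rw [T_pos n h, mem_stepSet] at hv
    have hm : (n / 10).toNat < n.toNat := by omega
    rcases hv with hv | ⟨b, hb, rfl⟩
    · have := ih (n / 10) hm v hv; omega
    · have := ih (n / 10) hm b hb; omega
  · rw [T_nonpos n h] at hv; simp at hv; omega

theorem T_mem : ∀ n : Int, ∀ v : Int, v ∈ T n ↔ (0 ≤ v ∧ check n v = true) := by
  refine int_strong (fun n => ∀ v : Int, v ∈ T n ↔ (0 ≤ v ∧ check n v = true)) ?_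
  intro n ih v
  by_cases h : 0 < n
  · have hm : (n / 10).toNat < n.toNat := by omega
    have IH := ih _ hm
    rw [T_pos n h, mem_stepSet, check_pos n v h]
    constructor
    · rintro (hv | ⟨b, hb, rfl⟩)
      · obtain ⟨hv0, hcv⟩ := (IH v).mp hv
        refine ⟨hv0, ?_⟩
        by_cases h1 : n % 10 = v % 10
        · rw [if_pos h1]; exact check_div10 (n / 10) v hv0 hcv
        · rw [if_neg h1]; exact hcv
      · obtain ⟨hb0, hcb⟩ := (IH b).mp hb
        have e1 : (10 * b + n % 10) % 10 = n % 10 := by omega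
        have e2 : (10 * b + n % 10) / 10 = b := by omega
        refine ⟨by omega, ?_⟩
        rw [if_pos e1.symm, e2]
        exact hcb
    · rintro ⟨hv0, hcv⟩
      by_cases h1 : n % 10 = v % 10
      · rw [if_pos h1] at hcv
        exact Or.inr ⟨v / 10, (IH _).mpr ⟨by omega, hcv⟩, by omega⟩
      · rw [if_neg h1] at hcv
        exact Or.inl ((IH v).mpr ⟨hv0, hcv⟩)
  · rw [T_nonpos n h, check_nonpos n v h]
    simp
    omega

-- the list of multiples of 7 the A-loop visits
def mult (n a : Int) : List Int :=
  if _h : a ≤ n then a :: mult n (a + 7) else []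
termination_by (n + 7 - a).toNat
decreasing_by omega

theorem mem_mult (n a x : Int) : x ∈ mult n a ↔ a ≤ x ∧ x ≤ n ∧ (7 : Int) ∣ (x - a) := by
  induction a using mult.induct (n := n) with
  | case1 a h ih =>
    rw [mult]
    simp only [dif_pos h, List.mem_cons, ih]
    omega
  | case2 a h =>
    rw [mult]
    simp only [dif_neg h, List.not_mem_nil, false_iff]
    omega

theorem nodup_mult (n a : Int) : (mult n a).Nodup := by
  induction a using mult.induct (n := n) with
  | case1 a h ih =>
    rw [mult]
    simp only [dif_pos h, List.nodup_cons]
    exact ⟨fun hmem => by have := (mem_mult n (a + 7) a).mp hmem; omega, ih⟩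
  | case2 a h =>
    rw [mult]
    simp [dif_neg h]

theorem fooLoop_eq (n a ans : Int) :
    fooLoop n a ans = ans + ((mult n a).filter (fun x => check n x)).length := by
  induction a using mult.induct (n := n) generalizing ans with
  | case1 a h ih =>
    rw [fooLoop, mult]
    simp only [dif_pos h, List.filter_cons]
    rw [ih]
    by_cases hc : check n a = true
    · simp [hc]; ring
    · simp [hc]
  | case2 a h =>
    rw [fooLoop, mult]
    simp [dif_neg h]

theorem filters_perm (n : Int) :
    ((mult n 7).filter (fun x => check n x)).Perm
      ((T n).filter (fun v => decide (7 ≤ v) && (PySem.Int.mod v 7 == 0))) := by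
  refine (List.perm_ext_iff_of_nodup ((nodup_mult n 7).filter _) ((T_nodup n).filter _)).mpr ?_
  intro x
  simp only [List.mem_filter, mem_mult, T_mem, Bool.and_eq_true, decide_eq_true_eq,
    beq_iff_eq, PySem.Int.mod_eq_emod_of_pos (show (0:Int) < 7 by norm_num)]
  constructor
  · rintro ⟨⟨h7, hn, hd⟩, hc⟩
    exact ⟨⟨by omega, hc⟩, by omega, by omega⟩
  · rintro ⟨⟨h0, hc⟩, h7, hmod⟩
    have hle := T_le n x ((T_mem n x).mpr ⟨h0, hc⟩)
    exact ⟨⟨by omega, by omega, by omega⟩, hc⟩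

-- ===== VERDICT (by name: the statement is the Claim_ definition above) =====
theorem foo_spec : Claim_equal_foo := by
  intro n _
  show foo n = foo_alt n
  unfold foo foo_alt
  rw [fooLoop_eq]
  rw [(filters_perm n).length_eq]
  simp [T]
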